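-- pv_equiv track=rewrite | github.com/AzizT-dev/kat_overlap | core/results_handler.py | _choose_geometry_type
-- ===== SOURCE A (Python) =====
-- def _choose_geometry_type(geom_types: set) -> str:
--     """Choose appropriate layer geometry type"""
--     if not geom_types:
--         return "GeometryCollection"
--
--     types_lower = {str(t).lower() for t in geom_types}
--
--     if all('polygon' in t or 'multipolygon' in t for t in types_lower):
--         return "MultiPolygon"
--     elif all('linestring' in t or 'multilinestring' in t for t in types_lower):
--         return "MultiLineString"
--     elif all('point' in t or 'multipoint' in t for t in types_lower):
--         return "MultiPoint"
--     else:
--         return "GeometryCollection"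
-- ===== SOURCE B (Python) =====
-- def _choose_geometry_type(geom_types: set) -> str:
--     """Choose appropriate layer geometry type"""
--     if not geom_types:
--         return "GeometryCollection"
--
--     all_poly = all_line = all_point = True
--     for t in geom_types:
--         u = str(t).lower()
--         all_poly = all_poly and ('polygon' in u or 'multipolygon' in u)
--         all_line = all_line and ('linestring' in u or 'multilinestring' in u)
--         all_point = all_point and ('point' in u or 'multipoint' in u)
--
--     if all_poly:
--         return "MultiPolygon"
--     if all_line:
--         return "MultiLineString"
--     if all_point:
--         return "MultiPoint"
--     return "GeometryCollection"
-- ===== Notes on version B (the rewrite author's own statement) =====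
-- stated objective: alternative
-- what changed: Replaces the intermediate lowered set and up to three separate all() scans by a single pass over the types that maintains three boolean match-flags, then picks the result by flag precedence.
import Mathlib
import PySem

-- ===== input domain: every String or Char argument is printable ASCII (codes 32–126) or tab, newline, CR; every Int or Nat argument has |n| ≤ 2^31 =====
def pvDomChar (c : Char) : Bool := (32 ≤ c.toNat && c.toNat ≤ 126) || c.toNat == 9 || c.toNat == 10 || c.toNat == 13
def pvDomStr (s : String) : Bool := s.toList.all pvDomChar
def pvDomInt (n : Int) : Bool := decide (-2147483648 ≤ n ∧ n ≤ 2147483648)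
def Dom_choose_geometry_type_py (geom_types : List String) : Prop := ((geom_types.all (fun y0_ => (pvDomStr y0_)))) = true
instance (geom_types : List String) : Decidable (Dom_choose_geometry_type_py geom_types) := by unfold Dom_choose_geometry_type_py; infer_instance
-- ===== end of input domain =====

-- ===== PORT A =====
-- B replaces the lowered intermediate set and up to three all() scans by one pass keeping three flags (alternative, same cost).
def choose_geometry_type_py (geom_types : List String) : String :=
  if geom_types.isEmpty then "GeometryCollection"
  else
    let types_lower := PySem.Set.ofList (geom_types.map (fun t => PySem.Str.lower t))
    if types_lower.all (fun t => PySem.Str.isIn "polygon" t || PySem.Str.isIn "multipolygon" t) then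
      "MultiPolygon"
    else if types_lower.all (fun t => PySem.Str.isIn "linestring" t || PySem.Str.isIn "multilinestring" t) then
      "MultiLineString"
    else if types_lower.all (fun t => PySem.Str.isIn "point" t || PySem.Str.isIn "multipoint" t) then
      "MultiPoint"
    else
      "GeometryCollection"

-- ===== PORT B =====
def choose_geometry_type_py_alt (geom_types : List String) : String :=
  match geom_types with
  | [] => "GeometryCollection"
  | _ =>
    let flags := geom_types.foldl
      (fun (acc : Bool × Bool × Bool) t =>
        let u := PySem.Str.lower t
        (acc.1 && (PySem.Str.isIn "polygon" u || PySem.Str.isIn "multipolygon" u),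
         acc.2.1 && (PySem.Str.isIn "linestring" u || PySem.Str.isIn "multilinestring" u),
         acc.2.2 && (PySem.Str.isIn "point" u || PySem.Str.isIn "multipoint" u)))
      (true, true, true)
    if flags.1 then "MultiPolygon"
    else if flags.2.1 then "MultiLineString"
    else if flags.2.2 then "MultiPoint"
    else "GeometryCollection"

-- ===== PRECONDITION & SPEC =====
def Spec_choose_geometry_type_py (geom_types : List String) (out : String) : Prop := out = choose_geometry_type_py_alt geom_types
instance (geom_types : List String) (out : String) : Decidable (Spec_choose_geometry_type_py geom_types out) := by unfold Spec_choose_geometry_type_py; infer_instance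

-- ===== CLAIM (what is proved, stated in full; the proofs are below) =====
def Claim_equal_choose_geometry_type_py : Prop := ∀ (geom_types : List String), Dom_choose_geometry_type_py geom_types → Spec_choose_geometry_type_py geom_types (choose_geometry_type_py geom_types)

-- ===== LEMMAS AND PROOFS =====

-- all over a Python set built from a list coincides with all over the list (membership-based)
theorem set_ofList_all {α : Type} [BEq α] [LawfulBEq α] (l : List α) (p : α → Bool) :
    (PySem.Set.ofList l).all p = l.all p := by
  apply Bool.eq_iff_iff.mpr
  simp only [List.all_eq_true]
  constructor
  · intro h x hx; exact h x ((PySem.Set.mem_ofList l x).mpr hx)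
  · intro h x hx; exact h x ((PySem.Set.mem_ofList l x).mp hx)

-- the single-pass fold computes the three all-flags
theorem fold_flags (l : List String) (a b c : Bool) :
    l.foldl
      (fun (acc : Bool × Bool × Bool) t =>
        let u := PySem.Str.lower t
        (acc.1 && (PySem.Str.isIn "polygon" u || PySem.Str.isIn "multipolygon" u),
         acc.2.1 && (PySem.Str.isIn "linestring" u || PySem.Str.isIn "multilinestring" u),
         acc.2.2 && (PySem.Str.isIn "point" u || PySem.Str.isIn "multipoint" u)))
      (a, b, c)
    = (a && l.all (fun t => PySem.Str.isIn "polygon" (PySem.Str.lower t) || PySem.Str.isIn "multipolygon" (PySem.Str.lower t)),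
       b && l.all (fun t => PySem.Str.isIn "linestring" (PySem.Str.lower t) || PySem.Str.isIn "multilinestring" (PySem.Str.lower t)),
       c && l.all (fun t => PySem.Str.isIn "point" (PySem.Str.lower t) || PySem.Str.isIn "multipoint" (PySem.Str.lower t))) := by
  induction l generalizing a b c with
  | nil => simp
  | cons x xs ih =>
    simp only [List.foldl_cons, List.all_cons, ih]
    simp [Bool.and_assoc]

-- ===== VERDICT (by name: the statement is the Claim_ definition above) =====
theorem choose_geometry_type_py_spec : Claim_equal_choose_geometry_type_py := by
  intro l _
  unfold Spec_choose_geometry_type_py choose_geometry_type_py choose_geometry_type_py_alt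
  cases l with
  | nil => rfl
  | cons x xs =>
    simp only [List.isEmpty_cons, if_neg (by simp : ¬ (false = true))]
    rw [fold_flags]
    simp only [set_ofList_all, List.all_map, Function.comp_def, Bool.true_and]
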